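-- pv_equiv track=rewrite | github.com/SmileShmily/LaunchCode-summerofcode-Unit1 | ClassExercise & studio/chapter 11/Python_Yahtzee/scoring.py | yahtzee
-- ===== SOURCE A (Python) =====
-- def yahtzee(dice):
-- 	score = 0
-- 	count = 1
-- 	for i in range(0, 4):
-- 		if dice[i] == dice[i + 1]:
-- 			count += 1
-- 	if count == 5:
-- 		score = 50
-- 		return score
-- 	else:
-- 		return score
-- ===== SOURCE B (Python) =====
-- def yahtzee(dice):
--     faces = {dice[0], dice[1], dice[2], dice[3], dice[4]}
--     return 50 if len(faces) == 1 else 0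
-- ===== Notes on version B (the rewrite author's own statement) =====
-- stated objective: idiomatic
-- what changed: Replaces the adjacent-pair counting loop with building a set of the five dice and testing that its cardinality is 1.
import Mathlib
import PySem

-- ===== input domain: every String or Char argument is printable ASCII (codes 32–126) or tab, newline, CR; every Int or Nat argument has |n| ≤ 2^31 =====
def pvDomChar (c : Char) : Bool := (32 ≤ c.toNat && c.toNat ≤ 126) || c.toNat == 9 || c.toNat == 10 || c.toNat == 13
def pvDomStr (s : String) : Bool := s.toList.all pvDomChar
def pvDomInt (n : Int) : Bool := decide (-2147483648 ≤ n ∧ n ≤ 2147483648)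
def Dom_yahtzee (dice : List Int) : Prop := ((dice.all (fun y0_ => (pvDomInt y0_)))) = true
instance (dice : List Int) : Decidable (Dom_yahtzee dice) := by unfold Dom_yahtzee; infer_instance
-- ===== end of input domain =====

-- B replaces A's adjacent-pair counting loop with a set of the five dice and a cardinality-1 test (idiomatic; same cost).
-- ===== PORT A =====
def yahtzee (dice : List Int) : Int :=
  -- score = 0; count = 1; for i in range(0, 4): if dice[i] == dice[i+1]: count += 1;
  -- if count == 5: return 50 else: return score (= 0)
  let count : Int :=
    (PySem.List.pyRange 0 4 1).foldl
      (fun count i =>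
        if PySem.List.pyGetD dice i 0 = PySem.List.pyGetD dice (i + 1) 0 then count + 1 else count)
      1
  if count = 5 then 50 else 0

-- ===== PORT B =====
def yahtzee_alt (dice : List Int) : Int :=
  -- faces = {dice[0], dice[1], dice[2], dice[3], dice[4]}; return 50 if len(faces) == 1 else 0
  let faces : PySem.Set Int :=
    PySem.Set.ofList
      [PySem.List.pyGetD dice 0 0, PySem.List.pyGetD dice 1 0, PySem.List.pyGetD dice 2 0,
       PySem.List.pyGetD dice 3 0, PySem.List.pyGetD dice 4 0]
  if faces.length = 1 then 50 else 0

-- ===== PRECONDITION & SPEC =====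
-- Both programs index dice[0]..dice[4]: Python raises IndexError on lists shorter than 5.
def Pre_yahtzee (dice : List Int) : Prop := 5 ≤ dice.length
instance (dice : List Int) : Decidable (Pre_yahtzee dice) := by unfold Pre_yahtzee; infer_instance
def pvWitness_yahtzee : List Int := [3, 3, 3, 3, 3]

def Spec_yahtzee (dice : List Int) (out : Int) : Prop := out = yahtzee_alt dice
instance (dice : List Int) (out : Int) : Decidable (Spec_yahtzee dice out) := by unfold Spec_yahtzee; infer_instance

-- ===== CLAIM (what is proved, stated in full; the proofs are below) =====
def Claim_equal_yahtzee : Prop := ∀ (dice : List Int), Dom_yahtzee dice → Pre_yahtzee dice → Spec_yahtzee dice (yahtzee dice)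

-- ===== LEMMAS AND PROOFS =====
theorem pyRange04 : PySem.List.pyRange 0 4 1 = [0, 1, 2, 3] := by decide

theorem getD_cons5 (a b c d e : Int) (rest : List Int) :
    PySem.List.pyGetD (a :: b :: c :: d :: e :: rest) 0 0 = a ∧
    PySem.List.pyGetD (a :: b :: c :: d :: e :: rest) 1 0 = b ∧
    PySem.List.pyGetD (a :: b :: c :: d :: e :: rest) 2 0 = c ∧
    PySem.List.pyGetD (a :: b :: c :: d :: e :: rest) 3 0 = d ∧
    PySem.List.pyGetD (a :: b :: c :: d :: e :: rest) 4 0 = e := by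
  refine ⟨?_, ?_, ?_, ?_, ?_⟩ <;>
    · simp only [PySem.List.pyGetD, PySem.List.pyGet?, PySem.List.pyIdx?]
      split
      · rw [if_pos (by simp; omega)]; simp
      · exfalso; omega

theorem lenone (a b c d e : Int)
    (hl : (PySem.Set.ofList [a, b, c, d, e]).length = 1) : a = b ∧ b = c ∧ c = d ∧ d = e := by
  obtain ⟨x, hx⟩ := List.length_eq_one_iff.mp hl
  have ha : a ∈ PySem.Set.ofList [a, b, c, d, e] := by simp [PySem.Set.mem_ofList]
  have hb : b ∈ PySem.Set.ofList [a, b, c, d, e] := by simp [PySem.Set.mem_ofList]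
  have hc : c ∈ PySem.Set.ofList [a, b, c, d, e] := by simp [PySem.Set.mem_ofList]
  have hd : d ∈ PySem.Set.ofList [a, b, c, d, e] := by simp [PySem.Set.mem_ofList]
  have he : e ∈ PySem.Set.ofList [a, b, c, d, e] := by simp [PySem.Set.mem_ofList]
  rw [hx] at ha hb hc hd he
  simp at ha hb hc hd he
  omega

-- ===== VERDICT (by name: the statement is the Claim_ definition above) =====
theorem yahtzee_spec : Claim_equal_yahtzee := by
  intro dice _ hpre
  unfold Pre_yahtzee at hpre
  match dice, hpre with
  | a :: b :: c :: d :: e :: rest, _ =>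
    show yahtzee _ = yahtzee_alt _
    obtain ⟨h0, h1, h2, h3, h4⟩ := getD_cons5 a b c d e rest
    simp only [yahtzee, yahtzee_alt, pyRange04, List.foldl]
    norm_num [h0, h1, h2, h3, h4]
    by_cases h : a = b ∧ b = c ∧ c = d ∧ d = e
    · obtain ⟨rfl, rfl, rfl, rfl⟩ := h
      simp [PySem.Set.ofList, PySem.Set.add, PySem.Set.contains]
    · have hne : ¬ (PySem.Set.ofList [a, b, c, d, e]).length = 1 :=
        fun hl => h (lenone a b c d e hl)
      rw [if_neg hne]
      split_ifs <;> simp_all
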